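-- pv_equiv track=rewrite | github.com/Xilinx/Vitis-AI | dsa/XVDPU-TRD/xvdpu_ip/aie/scripts/getAddr.py | genMapCom
-- ===== SOURCE A (Python) =====
-- reg_map = {'commit_id':0x20,  'CPB': 0x24, 'BAT_NUM': 0x26, 'AIE_ACTIVATIONS_EN': 0x28, 'PL_FREQ': 0x2A, 'CHIP': 0x2C}
--
-- GRAPH_SYS_ADDR = 0x3800
--
-- GRAPH_STACK_SIZE = 0x400
--
-- GRAPH_SYNCBUF_SIZE = 0x20
--
-- AIE_ARRAY_OFFSET = 0x20000000000
--
-- def genMapCom(comMap, col, row):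
--   graph_base = GRAPH_SYS_ADDR + GRAPH_STACK_SIZE + GRAPH_SYNCBUF_SIZE
--   aiecompiler_base = comMap['layer_param_buf'][1]
--   hardware_base = AIE_ARRAY_OFFSET + int(col)*2**23 + int(row+1)*2**18 + graph_base
--   #print '[INFO]: addr map in diff addr space'
--   graph_map = {}
--   aiecompiler_map = {}
--   hardware_map = {}
--   for name in comMap:
--      diff = comMap[name][1] - aiecompiler_base
--      graph_map[name] = graph_base + diff
--      aiecompiler_map[name] = aiecompiler_base + diff
--      hardware_map[name] = hardware_base + diff
--   form = '  {:18}\t{:10}\t{:10}\t{:10}\n'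
--   pStr = form.format('name', 'graph_conv', 'aiecompiler', 'hardware')
--   for name in graph_map:
--      pStr += form.format(name, hex(graph_map[name]), hex(aiecompiler_map[name]), hex(hardware_map[name]))
--   #if aiecompiler_map.has_key("CONV_ONE_VEC"):
--   if "CONV_ONE_VEC" in aiecompiler_map:
--    pStr += 'reg map\n'
--    for name in reg_map:
--      base = "CONV_ONE_VEC"
--      off = reg_map[name]
--      pStr += form.format(name, hex(graph_map[base] + off), hex(aiecompiler_map[base] + off), hex(hardware_map[base] + off))
--   return pStr
-- ===== SOURCE B (Python) =====
-- # B: single pass over comMap emitting rows directly (no intermediate dicts); capture CONV_ONE_VEC's diff for the reg-map block.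
-- reg_map = {'commit_id':0x20,  'CPB': 0x24, 'BAT_NUM': 0x26, 'AIE_ACTIVATIONS_EN': 0x28, 'PL_FREQ': 0x2A, 'CHIP': 0x2C}
--
-- def genMapCom(comMap, col, row):
--   graph_base = 0x3800 + 0x400 + 0x20
--   aiecompiler_base = comMap['layer_param_buf'][1]
--   hardware_base = 0x20000000000 + int(col)*2**23 + int(row+1)*2**18 + graph_base
--   form = '  {:18}\t{:10}\t{:10}\t{:10}\n'
--   out = [form.format('name', 'graph_conv', 'aiecompiler', 'hardware')]
--   conv_diff = None
--   for name, vals in comMap.items():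
--     diff = vals[1] - aiecompiler_base
--     out.append(form.format(name, hex(graph_base + diff), hex(aiecompiler_base + diff), hex(hardware_base + diff)))
--     if name == 'CONV_ONE_VEC':
--       conv_diff = diff
--   if conv_diff is not None:
--     out.append('reg map\n')
--     for rname, off in reg_map.items():
--       out.append(form.format(rname, hex(graph_base + conv_diff + off), hex(aiecompiler_base + conv_diff + off), hex(hardware_base + conv_diff + off)))
--   return ''.join(out)
-- ===== Notes on version B (the rewrite author's own statement) =====
-- stated objective: simpler
-- what changed: B drops A's three intermediate name->address dicts and its two extra passes, formatting each report row directly in a single pass over comMap while capturing CONV_ONE_VEC's diff for the reg-map block, then joining the collected rows.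
-- outside the precondition, e.g. on genMapCom({}, 0, 0): A raises KeyError, B raises KeyError; on genMapCom({'layer_param_buf': [5]}, 0, 0): A raises IndexError, B raises IndexError
import Mathlib
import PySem

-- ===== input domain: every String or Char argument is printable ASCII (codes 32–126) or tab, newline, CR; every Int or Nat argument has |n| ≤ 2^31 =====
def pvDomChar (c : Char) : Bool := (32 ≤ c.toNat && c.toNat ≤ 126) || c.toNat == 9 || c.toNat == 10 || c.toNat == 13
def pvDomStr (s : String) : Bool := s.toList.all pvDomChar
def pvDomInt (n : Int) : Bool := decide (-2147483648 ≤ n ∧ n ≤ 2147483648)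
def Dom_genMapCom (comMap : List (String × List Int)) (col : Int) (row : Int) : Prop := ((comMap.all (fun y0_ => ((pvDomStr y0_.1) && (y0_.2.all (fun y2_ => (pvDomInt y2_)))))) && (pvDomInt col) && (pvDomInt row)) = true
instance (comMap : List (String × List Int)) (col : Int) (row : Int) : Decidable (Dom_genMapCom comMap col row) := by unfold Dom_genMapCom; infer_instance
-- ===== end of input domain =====

-- B builds the report in one pass over the dict (no intermediate graph/aiecompiler/hardware dicts),
-- capturing CONV_ONE_VEC's diff for the reg-map block; objective: simpler. Return value only (A mutates nothing).

-- shared helpers: Python's hex() and the format string '  {:18}\t{:10}\t{:10}\t{:10}\n'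
-- (exact: hex() = '0x'/' -0x' + lowercase hex digits; {:w} left-justifies a string, space-padded, no truncation)
def hexChars (n : Int) : List Char :=
  if n < 0 then '-' :: '0' :: 'x' :: Nat.toDigits 16 n.natAbs
  else '0' :: 'x' :: Nat.toDigits 16 n.natAbs

def padTo (s : List Char) (w : Nat) : List Char := s ++ List.replicate (w - s.length) ' '

def formRow (a b c d : List Char) : List Char :=
  ' ' :: ' ' :: (padTo a 18 ++ '\t' :: (padTo b 10 ++ '\t' :: (padTo c 10 ++ '\t' :: (padTo d 10 ++ ['\n']))))

-- module constant reg_map (a dict literal; iterated in insertion order)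
def regMapL : List (String × Int) :=
  [("commit_id", 0x20), ("CPB", 0x24), ("BAT_NUM", 0x26),
   ("AIE_ACTIVATIONS_EN", 0x28), ("PL_FREQ", 0x2A), ("CHIP", 0x2C)]

-- ===== PORT A =====
def genMapCom (comMap : List (String × List Int)) (col : Int) (row : Int) : String :=
  let d := PySem.Dict.ofList comMap
  let graph_base : Int := 0x3800 + 0x400 + 0x20
  -- comMap['layer_param_buf'][1]: KeyError/IndexError are excluded by Pre_; defaults are never used inside Pre_
  let aiecompiler_base : Int := PySem.List.pyGetD (d.getD "layer_param_buf" []) 1 0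
  let hardware_base : Int := 0x20000000000 + col * 8388608 + (row + 1) * 262144 + graph_base
  let maps := d.keys.foldl
    (fun (m : PySem.Dict String Int × PySem.Dict String Int × PySem.Dict String Int) name =>
      let diff := PySem.List.pyGetD (d.getD name []) 1 0 - aiecompiler_base
      (m.1.insert name (graph_base + diff), m.2.1.insert name (aiecompiler_base + diff),
       m.2.2.insert name (hardware_base + diff)))
    (PySem.Dict.empty, PySem.Dict.empty, PySem.Dict.empty)
  let graph_map := maps.1
  let aiecompiler_map := maps.2.1
  let hardware_map := maps.2.2
  let pStr := formRow "name".toList "graph_conv".toList "aiecompiler".toList "hardware".toList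
  let pStr := graph_map.keys.foldl
    (fun s name => s ++ formRow name.toList (hexChars (graph_map.getD name 0))
        (hexChars (aiecompiler_map.getD name 0)) (hexChars (hardware_map.getD name 0))) pStr
  let pStr := if aiecompiler_map.contains "CONV_ONE_VEC" then
      regMapL.foldl
        (fun s p => s ++ formRow p.1.toList (hexChars (graph_map.getD "CONV_ONE_VEC" 0 + p.2))
            (hexChars (aiecompiler_map.getD "CONV_ONE_VEC" 0 + p.2))
            (hexChars (hardware_map.getD "CONV_ONE_VEC" 0 + p.2)))
        (pStr ++ "reg map\n".toList)
    else pStr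
  String.ofList pStr

-- ===== PORT B =====
def genMapCom_alt (comMap : List (String × List Int)) (col : Int) (row : Int) : String :=
  let d := PySem.Dict.ofList comMap
  let graph_base : Int := 0x3800 + 0x400 + 0x20
  let aiecompiler_base : Int := PySem.List.pyGetD (d.getD "layer_param_buf" []) 1 0
  let hardware_base : Int := 0x20000000000 + col * 8388608 + (row + 1) * 262144 + graph_base
  let st := d.items.foldl
    (fun (st : List (List Char) × Option Int) (p : String × List Int) =>
      let diff := PySem.List.pyGetD p.2 1 0 - aiecompiler_base
      (st.1 ++ [formRow p.1.toList (hexChars (graph_base + diff)) (hexChars (aiecompiler_base + diff))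
                  (hexChars (hardware_base + diff))],
       if p.1 = "CONV_ONE_VEC" then some diff else st.2))
    ([formRow "name".toList "graph_conv".toList "aiecompiler".toList "hardware".toList], none)
  let out := match st.2 with
    | none => st.1
    | some conv_diff =>
        regMapL.foldl
          (fun out (p : String × Int) => out ++ [formRow p.1.toList (hexChars (graph_base + conv_diff + p.2))
              (hexChars (aiecompiler_base + conv_diff + p.2)) (hexChars (hardware_base + conv_diff + p.2))])
          (st.1 ++ ["reg map\n".toList])
  String.ofList out.flatten

-- ===== PRECONDITION & SPEC =====
-- Pre_ excludes exactly the inputs where Python A raises: a missing 'layer_param_buf' key (KeyError)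
-- or some value of the (deduplicated) dict with fewer than two elements (IndexError on v[1]).
def Pre_genMapCom (comMap : List (String × List Int)) (col : Int) (row : Int) : Prop :=
  (PySem.Dict.ofList comMap).contains "layer_param_buf" = true ∧
  ∀ v ∈ (PySem.Dict.ofList comMap).values, 2 ≤ v.length
instance (comMap : List (String × List Int)) (col : Int) (row : Int) : Decidable (Pre_genMapCom comMap col row) := by unfold Pre_genMapCom; infer_instance

def pvWitness_genMapCom : (List (String × List Int)) × Int × Int :=
  ([("layer_param_buf", [0, 100]), ("CONV_ONE_VEC", [0, 116])], 1, 2)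

def Spec_genMapCom (comMap : List (String × List Int)) (col : Int) (row : Int) (out : String) : Prop := out = genMapCom_alt comMap col row
instance (comMap : List (String × List Int)) (col : Int) (row : Int) (out : String) : Decidable (Spec_genMapCom comMap col row out) := by unfold Spec_genMapCom; infer_instance

-- ===== CLAIM (what is proved, stated in full; the proofs are below) =====
def Claim_equal_genMapCom : Prop := ∀ (comMap : List (String × List Int)) (col : Int) (row : Int), Dom_genMapCom comMap col row → Pre_genMapCom comMap col row → Spec_genMapCom comMap col row (genMapCom comMap col row)

-- ===== LEMMAS AND PROOFS =====

-- A's single loop building the three dicts equals three independent builds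
theorem foldl_build3 (l : List String) (vg va vh : String → Int)
    (b c e : PySem.Dict String Int) :
    l.foldl (fun m n => (m.1.insert n (vg n), m.2.1.insert n (va n), m.2.2.insert n (vh n))) (b, c, e)
      = (l.foldl (fun m n => m.insert n (vg n)) b,
         l.foldl (fun m n => m.insert n (va n)) c,
         l.foldl (fun m n => m.insert n (vh n)) e) := by
  induction l generalizing b c e with
  | nil => rfl
  | cons a t ih => simpa using ih ..

-- a dict built by inserting distinct keys maps each of them to its value
theorem build_getD (l : List String) (hl : l.Nodup) (v : String → Int)
    {name : String} (hm : name ∈ l) :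
    (l.foldl (fun (m : PySem.Dict String Int) n => m.insert n (v n)) PySem.Dict.empty).getD name 0
      = v name := by
  apply PySem.Dict.getD_of_mem_items (v := v name)
  · have h := PySem.Dict.items_foldl_insert_fresh l id v PySem.Dict.empty
        (fun a _ => PySem.Dict.contains_empty a) (by simpa using hl)
    simp only [id] at h
    rw [h]
    exact List.mem_append_right _ (List.mem_map_of_mem (f := fun a => (a, v a)) hm)
  · exact PySem.Dict.nodup_keys_foldl_insert l (fun _ n => v n) _ PySem.Dict.nodup_keys_empty

theorem build_keys (l : List String) (hl : l.Nodup) (v : String → Int) :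
    (l.foldl (fun (m : PySem.Dict String Int) n => m.insert n (v n)) PySem.Dict.empty).keys = l := by
  rw [PySem.Dict.keys_foldl_insert l (fun _ n => v n)]
  simp [PySem.Set.update_nil_left, PySem.Set.ofList_eq_self_of_nodup l hl]

-- B's single loop splits into the row list and the captured CONV_ONE_VEC diff
theorem foldl_pair_rows (l : List String) (R : String → List Char) (dv : String → Int)
    (o : List (List Char)) (c : Option Int) :
    l.foldl (fun st n => (st.1 ++ [R n], if n = "CONV_ONE_VEC" then some (dv n) else st.2)) (o, c)
      = (o ++ l.map R,
         l.foldl (fun c n => if n = "CONV_ONE_VEC" then some (dv n) else c) c) := by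
  induction l generalizing o c with
  | nil => simp
  | cons a t ih => simp [ih]

-- over distinct names, the captured diff is CONV_ONE_VEC's iff it occurs
theorem conv_fold (l : List String) (hl : l.Nodup) (dv : String → Int) (c : Option Int) :
    l.foldl (fun c n => if n = "CONV_ONE_VEC" then some (dv n) else c) c
      = if "CONV_ONE_VEC" ∈ l then some (dv "CONV_ONE_VEC") else c := by
  induction l generalizing c with
  | nil => simp
  | cons a t ih =>
    rcases List.nodup_cons.mp hl with ⟨ha, ht⟩
    rw [List.foldl_cons, ih ht]
    by_cases h : a = "CONV_ONE_VEC"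
    · subst h; simp [ha]
    · simp [h, Ne.symm h]

theorem genMapCom_eq_alt (comMap : List (String × List Int)) (col : Int) (row : Int) :
    genMapCom comMap col row = genMapCom_alt comMap col row := by
  unfold genMapCom genMapCom_alt
  dsimp only
  have hnd : (PySem.Dict.ofList comMap).keys.Nodup := PySem.Dict.nodup_keys_ofList comMap
  set d := PySem.Dict.ofList comMap with hd
  set l := d.keys with hlk
  set ab : Int := PySem.List.pyGetD (d.getD "layer_param_buf" []) 1 0 with hab
  set dv : String → Int := fun n => PySem.List.pyGetD (d.getD n []) 1 0 - ab with hdv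
  -- normalize B: items as a map over keys, then split the pair fold
  rw [PySem.Dict.items_eq_map_keys d hnd []]
  rw [List.foldl_map]
  simp only []
  rw [foldl_pair_rows, conv_fold l hnd]
  -- normalize A: split the triple build, compute its lookups and keys
  rw [foldl_build3]
  simp only []
  rw [build_keys l hnd, PySem.Dict.contains_eq_decide_mem_keys, build_keys l hnd]
  rw [PySem.List.foldl_congr_mem' l _
      (fun s name => s ++ formRow name.toList (hexChars (0x3800 + 0x400 + 0x20 + dv name))
        (hexChars (ab + dv name))
        (hexChars (0x20000000000 + col * 8388608 + (row + 1) * 262144 + (0x3800 + 0x400 + 0x20) + dv name)))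
      _ (fun x hx acc => by
        rw [build_getD l hnd _ hx, build_getD l hnd _ hx, build_getD l hnd _ hx])]
  rw [PySem.List.foldl_append_eq_flatMap]
  by_cases hc : "CONV_ONE_VEC" ∈ l
  · simp only [hc, decide_true, if_true]
    rw [build_getD l hnd _ hc, build_getD l hnd _ hc, build_getD l hnd _ hc,
        PySem.List.foldl_append_eq_flatMap]
    rw [PySem.List.foldl_append_singleton_eq_map]
    simp [hdv, ← hlk, List.flatMap_def, List.flatten_append, add_sub_cancel]
  · simp only [hc, decide_false, if_false]
    simp [hdv, ← hlk, add_sub_cancel]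

-- ===== VERDICT (by name: the statement is the Claim_ definition above) =====
theorem genMapCom_spec : Claim_equal_genMapCom := by
  intro comMap col row _ _
  unfold Spec_genMapCom
  exact genMapCom_eq_alt comMap col row
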